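-- pv_equiv track=rewrite | github.com/mushcatshiro/mahjong | game.py | get_valid_eye_sets
-- ===== SOURCE A (Python) =====
-- def get_valid_eye_sets(free_tiles):
--     rv = []
--     distinct_tile_count = {}
--     for tiles in free_tiles:
--         if tiles not in distinct_tile_count:
--             distinct_tile_count[tiles] = 1
--         else:
--             distinct_tile_count[tiles] += 1
--     return [k for k, v in distinct_tile_count.items() if v >= 2]
-- ===== SOURCE B (Python) =====
-- def get_valid_eye_sets(free_tiles):
--     # a tile is a valid eye iff its position is a first occurrence with a later duplicate
--     return [t for i, t in enumerate(free_tiles)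
--             if t not in free_tiles[:i] and t in free_tiles[i + 1:]]
-- ===== Notes on version B (the rewrite author's own statement) =====
-- stated objective: alternative
-- what changed: Drops the frequency dict entirely: B keeps a tile exactly when its position is the first occurrence (not in the prefix) and the tile recurs in the suffix, via one positional comprehension with prefix/suffix membership tests instead of A's count-then-filter-items two-stage pass.
import Mathlib
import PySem

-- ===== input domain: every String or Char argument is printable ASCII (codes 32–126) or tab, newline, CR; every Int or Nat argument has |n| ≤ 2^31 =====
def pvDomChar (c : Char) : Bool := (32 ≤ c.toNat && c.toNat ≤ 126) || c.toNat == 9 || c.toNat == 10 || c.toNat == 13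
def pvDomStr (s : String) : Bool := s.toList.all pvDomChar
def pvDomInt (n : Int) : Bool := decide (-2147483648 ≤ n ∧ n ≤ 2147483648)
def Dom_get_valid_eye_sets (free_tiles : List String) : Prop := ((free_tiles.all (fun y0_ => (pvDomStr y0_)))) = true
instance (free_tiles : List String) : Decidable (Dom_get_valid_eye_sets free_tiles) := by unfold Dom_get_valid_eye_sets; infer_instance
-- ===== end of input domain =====

-- B drops A's frequency dict entirely: it keeps a tile iff its position is a first
-- occurrence (not in the prefix) with a later duplicate (in the suffix) — an
-- alternative positional algorithm, not faster (O(n^2) vs A's O(n)).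

-- ===== PORT A =====
def get_valid_eye_sets (free_tiles : List String) : List String :=
  -- rv = [] is dead in A (never used); distinct_tile_count is the dict loop below
  let distinct_tile_count : PySem.Dict String Int :=
    free_tiles.foldl
      (fun d tiles =>
        if d.contains tiles = false then d.insert tiles 1
        else d.modify tiles 0 (· + 1))
      PySem.Dict.empty
  (distinct_tile_count.items.filter (fun kv => decide ((2 : Int) ≤ kv.2))).map Prod.fst

-- ===== PORT B =====
def get_valid_eye_sets_alt (free_tiles : List String) : List String :=
  -- [t for i, t in enumerate(free_tiles) if t not in free_tiles[:i] and t in free_tiles[i+1:]]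
  ((PySem.List.enumerate free_tiles).filter
    (fun it =>
      decide (it.2 ∉ PySem.List.slice free_tiles none (some it.1)) &&
      decide (it.2 ∈ PySem.List.slice free_tiles (some (it.1 + 1)) none))).map Prod.snd

-- ===== PRECONDITION & SPEC =====
def Spec_get_valid_eye_sets (free_tiles : List String) (out : List String) : Prop := out = get_valid_eye_sets_alt free_tiles
instance (free_tiles : List String) (out : List String) : Decidable (Spec_get_valid_eye_sets free_tiles out) := by unfold Spec_get_valid_eye_sets; infer_instance

-- ===== CLAIM (what is proved, stated in full; the proofs are below) =====
def Claim_equal_get_valid_eye_sets : Prop := ∀ (free_tiles : List String), Dom_get_valid_eye_sets free_tiles → Spec_get_valid_eye_sets free_tiles (get_valid_eye_sets free_tiles)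

-- ===== LEMMAS AND PROOFS =====

-- A's dict step ("insert 1 if new, else += 1") is exactly the Counter step.
theorem stepA_eq (d : PySem.Dict String Int) (t : String) :
    (if d.contains t = false then d.insert t 1 else d.modify t 0 (· + 1)) = d.modify t 0 (· + 1) := by
  by_cases h : d.contains t = false
  · simp [h, PySem.Dict.insert, PySem.Dict.modify, PySem.Dict.getD_of_not_contains (h := h)]
  · simp [h]

-- A = first occurrences whose count is ≥ 2.
theorem hA (free_tiles : List String) :
    get_valid_eye_sets free_tiles
      = (PySem.Set.ofList free_tiles).filter
          (fun k => decide (2 ≤ free_tiles.count k)) := by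
  unfold get_valid_eye_sets
  simp only [stepA_eq]
  rw [show free_tiles.foldl (fun d t => d.modify t 0 (· + 1)) PySem.Dict.empty
        = PySem.Dict.counter free_tiles from rfl]
  rw [PySem.Dict.items_counter]
  simp only [List.filter_map, List.map_map]
  simp [Function.comp_def]

-- The tail of B's comprehension, with x banned via "seen", equals the x-discarded
-- first-occurrence filter with counts taken in x :: xs.
theorem tail_filters_eq (xs seen : List String) (x : String) :
    (PySem.Set.ofList xs).filter (fun t => decide (t ∉ seen ++ [x]) && decide (2 ≤ xs.count t))
  = (PySem.Set.discard (PySem.Set.ofList xs) x).filter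
      (fun t => decide (t ∉ seen) && decide (2 ≤ (x :: xs).count t)) := by
  simp only [PySem.Set.discard, List.filter_filter]
  apply List.filter_congr
  intro t _
  by_cases htx : t = x
  · subst htx; simp
  · have hxt : ¬ x = t := fun h => htx h.symm
    have hc : (x :: xs).count t = xs.count t := by
      simp [hxt]
    simp [htx, hc, List.mem_append]

-- Generalized invariant for B's comprehension: scanning the tail xs of seen ++ xs
-- (indices starting at seen.length) keeps exactly the first occurrences in xs, not
-- already in seen, whose count in xs is ≥ 2.
theorem hB_gen (xs : List String) : ∀ (seen : List String),
    ((PySem.List.enumerate xs (seen.length : Int)).filter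
      (fun it =>
        decide (it.2 ∉ PySem.List.slice (seen ++ xs) none (some it.1)) &&
        decide (it.2 ∈ PySem.List.slice (seen ++ xs) (some (it.1 + 1)) none))).map Prod.snd
    = (PySem.Set.ofList xs).filter
        (fun t => decide (t ∉ seen) && decide (2 ≤ xs.count t)) := by
  induction xs with
  | nil => intro seen; simp [PySem.List.enumerate, PySem.Set.ofList]
  | cons x xs ih =>
    intro seen
    rw [PySem.List.enumerate_cons]
    have hslices_head :
        PySem.List.slice (seen ++ x :: xs) none (some (seen.length : Int)) = seen := by
      rw [PySem.List.slice_to_natCast, List.take_left]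
    have hslices_tail :
        PySem.List.slice (seen ++ x :: xs) (some ((seen.length : Int) + 1)) none = xs := by
      rw [show ((seen.length : Int) + 1) = (((seen ++ [x]).length : Nat) : Int) by simp,
          show seen ++ x :: xs = (seen ++ [x]) ++ xs by simp,
          PySem.List.slice_from_natCast]
      exact List.drop_left
    -- rewrite the whole cons-list into the (seen ++ [x]) form for the IH
    have hcons : seen ++ x :: xs = (seen ++ [x]) ++ xs := by simp
    have hstart : (seen.length : Int) + 1 = ((seen ++ [x]).length : Int) := by
      simp
    rw [List.filter_cons]
    simp only [hslices_head, hslices_tail]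
    rw [hcons, hstart]
    rw [apply_ite (List.map Prod.snd)]
    simp only [List.map_cons]
    rw [ih (seen ++ [x])]
    -- now compare with the RHS, peeled via ofList_cons
    rw [PySem.Set.ofList_cons, List.filter_cons]
    by_cases hx : x ∉ seen ∧ x ∈ xs
    · have hcnt : (2 : Nat) ≤ (x :: xs).count x := by
        have h1 : 1 ≤ xs.count x := List.one_le_count_iff.mpr hx.2
        rw [List.count_cons_self]; omega
      have hhead : (decide (x ∉ seen) && decide (x ∈ xs)) = true := by
        simp only [Bool.and_eq_true, decide_eq_true_eq]
        exact ⟨hx.1, hx.2⟩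
      have hhead' : (decide (x ∉ seen) && decide (2 ≤ (x :: xs).count x)) = true := by
        simp only [Bool.and_eq_true, decide_eq_true_eq]
        exact ⟨hx.1, hcnt⟩
      rw [hhead, hhead']
      rw [if_pos rfl, if_pos rfl]
      -- tails agree: filter over discard vs filter with extra ≠ x conjunct
      rw [tail_filters_eq xs seen x]
    · have hx' : ¬ (x ∉ seen ∧ x ∈ xs) := hx
      have hhead : (decide (x ∉ seen) && decide (x ∈ xs)) = false := by
        by_cases h1 : x ∈ seen
        · simp [h1]
        · have h2 : x ∉ xs := by tauto
          simp [h2]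
      have hcnt : ¬ (2 : Nat) ≤ (x :: xs).count x ∨ x ∈ seen := by
        by_cases h1 : x ∈ seen
        · right; exact h1
        · left
          have h2 : x ∉ xs := by tauto
          have : xs.count x = 0 := List.count_eq_zero.mpr h2
          simp [List.count_cons_self, this]
      have hhead' : (decide (x ∉ seen) && decide (2 ≤ (x :: xs).count x)) = false := by
        rcases hcnt with h | h
        · have h2 : decide (2 ≤ (x :: xs).count x) = false := by simpa using h
          rw [h2, Bool.and_false]
        · have h2 : decide (x ∉ seen) = false := by simpa using h
          rw [h2, Bool.false_and]
      rw [hhead, hhead']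
      simp only [Bool.false_eq_true, if_false]
      rw [tail_filters_eq xs seen x]

-- ===== VERDICT (by name: the statement is the Claim_ definition above) =====
theorem get_valid_eye_sets_spec : Claim_equal_get_valid_eye_sets := by
  intro free_tiles _
  unfold Spec_get_valid_eye_sets
  unfold get_valid_eye_sets_alt
  rw [hA]
  have hb := hB_gen free_tiles []
  simp only [List.length_nil, Nat.cast_zero, List.nil_append] at hb
  refine Eq.trans ?_ hb.symm
  apply List.filter_congr
  intro t _
  simp
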